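-- pv_equiv track=rewrite | github.com/glasgow-ipl/ips-protodesc-code | parse_rfc_txt.py | trim_blank_lines
-- ===== SOURCE A (Python) =====
-- def trim_blank_lines(lines):
--     trimmed_lines = []
--     started = False
--     for i in range(len(lines)):
--         if not started and lines[i] == "\n":
--             continue
--         if i > 0 and lines[i] == "\n" and lines[i-1] == "\n":
--             continue
--         else:
--             trimmed_lines.append(lines[i])
--             started = True
--     return trimmed_lines
-- ===== SOURCE B (Python) =====
-- def trim_blank_lines(lines):
--     # Runs-based: drop the leading blank run, then emit non-blank lines as-is
--     # and collapse each blank run to a single "\n".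
--     i = 0
--     while i < len(lines) and lines[i] == "\n":
--         i += 1
--     out = []
--     while i < len(lines):
--         if lines[i] == "\n":
--             out.append("\n")
--             while i < len(lines) and lines[i] == "\n":
--                 i += 1
--         else:
--             out.append(lines[i])
--             i += 1
--     return out
-- ===== Notes on version B (the rewrite author's own statement) =====
-- stated objective: alternative
-- what changed: Replaces A's per-index look-back (started flag + lines[i-1] comparison) with a runs decomposition: skip the leading blank run, then copy non-blank lines and collapse each blank run to one newline with an inner skip loop.
import Mathlib
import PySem

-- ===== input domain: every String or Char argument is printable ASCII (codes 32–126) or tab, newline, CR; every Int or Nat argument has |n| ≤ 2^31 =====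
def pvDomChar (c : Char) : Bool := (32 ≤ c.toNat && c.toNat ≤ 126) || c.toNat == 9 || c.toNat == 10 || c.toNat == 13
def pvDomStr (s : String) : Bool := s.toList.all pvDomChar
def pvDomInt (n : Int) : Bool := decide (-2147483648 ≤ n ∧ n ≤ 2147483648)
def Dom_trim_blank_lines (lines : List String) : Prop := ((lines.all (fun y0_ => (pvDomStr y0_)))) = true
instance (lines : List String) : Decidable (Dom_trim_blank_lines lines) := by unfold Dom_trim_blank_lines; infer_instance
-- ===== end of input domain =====

-- B replaces A's per-index look-back (started flag + lines[i-1]) with a runs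
-- decomposition (drop leading blank run, collapse each blank run to one "\n"); alternative, same cost.


-- ===== PORT A =====
-- A's for-loop over indices, carried as structural recursion; the look-back
-- lines[i-1] is carried as `prev` (none ⟺ i = 0), the flag as `started`,
-- the output as the accumulator `acc` (append at the back, as A does).
def trimLoopA : List String → Option String → Bool → List String → List String
  | [], _, _, acc => acc
  | l :: rest, prev, started, acc =>
    if !started && l == "\n" then
      trimLoopA rest (some l) started acc
    else if (match prev with | some p => p == "\n" | none => false) && l == "\n" then
      trimLoopA rest (some l) started acc
    else
      trimLoopA rest (some l) true (acc ++ [l])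

def trim_blank_lines (lines : List String) : List String :=
  trimLoopA lines none false []

-- ===== PORT B =====
-- Source B's second while-loop: copy a non-blank line, or emit one "\n" and skip
-- the rest of the blank run (the inner while = dropWhile).
def trimRunsB : List String → List String
  | [] => []
  | l :: rest =>
    if l == "\n" then
      "\n" :: trimRunsB (rest.dropWhile (fun x => x == "\n"))
    else
      l :: trimRunsB rest
  termination_by ls => ls.length
  decreasing_by
  · exact Nat.lt_succ_of_le (List.length_dropWhile_le _ _)
  · simp

def trim_blank_lines_alt (lines : List String) : List String :=
  trimRunsB (lines.dropWhile (fun x => x == "\n"))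

-- ===== PRECONDITION & SPEC =====
def Spec_trim_blank_lines (lines : List String) (out : List String) : Prop := out = trim_blank_lines_alt lines
instance (lines : List String) (out : List String) : Decidable (Spec_trim_blank_lines lines out) := by unfold Spec_trim_blank_lines; infer_instance

-- ===== CLAIM (what is proved, stated in full; the proofs are below) =====
def Claim_equal_trim_blank_lines : Prop := ∀ (lines : List String), Dom_trim_blank_lines lines → Spec_trim_blank_lines lines (trim_blank_lines lines)

-- ===== LEMMAS AND PROOFS =====

theorem trimRunsB_blank_cons (rest : List String) :
    trimRunsB ("\n" :: rest) = "\n" :: trimRunsB (rest.dropWhile (fun x => x == "\n")) := by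
  rw [trimRunsB]; simp

-- The single invariant relating A's state machine to B's runs recursion:
-- if started with a non-"\n" previous line (or none), A continues like trimRunsB;
-- otherwise (not started, or previous line was "\n") A first skips the blank run.
theorem trimLoopA_eq (ls : List String) :
    ∀ (prev : Option String) (started : Bool) (acc : List String),
      trimLoopA ls prev started acc =
        acc ++ (if started && !(match prev with | some p => p == "\n" | none => false)
                then trimRunsB ls
                else trimRunsB (ls.dropWhile (fun x => x == "\n"))) := by
  induction ls with
  | nil => intro prev started acc; simp [trimLoopA, trimRunsB]
  | cons l rest ih =>
    intro prev started acc
    by_cases hl : l = "\n"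
    · subst hl
      cases started with
      | false =>
        simp only [trimLoopA, Bool.not_false, Bool.true_and, beq_self_eq_true, if_true,
          Bool.false_and]
        rw [ih]
        simp [List.dropWhile]
      | true =>
        cases hp : (match prev with | some p => p == "\n" | none => false) with
        | true =>
          simp only [trimLoopA, hp, Bool.not_true, Bool.true_and,
            beq_self_eq_true, if_true]
          rw [ih]
          simp [List.dropWhile]
        | false =>
          simp only [trimLoopA, hp, Bool.not_true, Bool.true_and,
            beq_self_eq_true, Bool.and_true]
          rw [ih (some "\n") true (acc ++ ["\n"])]
          simp [trimRunsB_blank_cons]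
    · have hl' : (l == "\n") = false := by simp [hl]
      simp only [trimLoopA, hl', Bool.and_false]
      rw [ih (some l) true (acc ++ [l])]
      simp [trimRunsB, hl']

-- ===== VERDICT (by name: the statement is the Claim_ definition above) =====
theorem trim_blank_lines_spec : Claim_equal_trim_blank_lines := by
  intro lines _
  unfold Spec_trim_blank_lines trim_blank_lines trim_blank_lines_alt
  rw [trimLoopA_eq]
  simp
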